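-- pv_equiv track=rewrite | github.com/henriquedsreis/aoc | day4.py | check_any_2seq
-- ===== SOURCE A (Python) =====
-- def check_any_2seq(password: str):
--     i = 0
--
--     while i < len(password):
--         curr_seq = password[i]
--         seq_count = 1
--         i += 1
--
--         while i < len(password) and password[i] == curr_seq:
--             seq_count += 1
--             i += 1
--
--         if seq_count == 2:
--             return True
--     return False
-- ===== SOURCE B (Python) =====
-- def check_any_2seq(password: str):
--     n = len(password)
--     return any(
--         password[i] == password[i + 1]
--         and (i == 0 or password[i - 1] != password[i])
--         and (i + 2 == n or password[i + 2] != password[i])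
--         for i in range(n - 1)
--     )
-- ===== Notes on version B (the rewrite author's own statement) =====
-- stated objective: alternative
-- what changed: Instead of A's stateful run-length counter (nested whiles maintaining seq_count), B uses a local-window characterisation: a run of exactly two equal characters exists iff some position i has s[i]==s[i+1] with both outer neighbours different (or absent), tested with any() over positions -- no run counting or grouping at all.
import Mathlib
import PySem

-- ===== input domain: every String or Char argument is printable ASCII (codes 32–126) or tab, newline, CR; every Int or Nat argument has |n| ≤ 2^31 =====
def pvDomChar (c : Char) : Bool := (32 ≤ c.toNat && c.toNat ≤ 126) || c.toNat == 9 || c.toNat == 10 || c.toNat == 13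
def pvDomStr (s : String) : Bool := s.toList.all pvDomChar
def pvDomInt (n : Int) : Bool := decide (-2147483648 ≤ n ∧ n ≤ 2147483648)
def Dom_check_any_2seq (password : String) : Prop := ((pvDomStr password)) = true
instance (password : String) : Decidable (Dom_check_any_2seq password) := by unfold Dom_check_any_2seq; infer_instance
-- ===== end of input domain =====

-- B replaces A's stateful run-length counter with a stateless local-window test:
-- some adjacent equal pair whose outer neighbours (if any) differ (alternative; same cost).

-- ===== PORT A =====
-- inner while: consumes chars equal to curr, incrementing seq_count; returns (seq_count, rest)
def pvInner (curr : Char) : List Char → Int → Int × List Char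
  | [], cnt => (cnt, [])
  | c :: rest, cnt => if c == curr then pvInner curr rest (cnt + 1) else (cnt, c :: rest)

theorem pvInner_snd_length (curr : Char) (l : List Char) (cnt : Int) :
    (pvInner curr l cnt).2.length ≤ l.length := by
  induction l generalizing cnt with
  | nil => simp [pvInner]
  | cons c rest ih =>
    simp only [pvInner]
    split
    · exact Nat.le_trans (ih _) (Nat.le_succ _)
    · simp

-- outer while over the remaining characters
def pvOuter : List Char → Bool
  | [] => false
  | c :: rest =>
    let p := pvInner c rest 1
    if p.1 == 2 then true else pvOuter p.2
termination_by l => l.length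
decreasing_by
  exact Nat.lt_succ_of_le (pvInner_snd_length c rest 1)

def check_any_2seq (password : String) : Bool := pvOuter password.toList

-- ===== PORT B =====
-- the window predicate tested at position i (all accesses are in range when i < n-1,
-- so the getD default is never returned on those positions)
def pvWin (l : List Char) (n : Nat) (i : Nat) : Bool :=
  (l.getD i ' ' == l.getD (i + 1) ' ') &&
  (i == 0 || l.getD (i - 1) ' ' != l.getD i ' ') &&
  (i + 2 == n || l.getD (i + 2) ' ' != l.getD i ' ')

def check_any_2seq_alt (password : String) : Bool :=
  (List.range (password.toList.length - 1)).any
    (pvWin password.toList password.toList.length)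

-- ===== PRECONDITION & SPEC =====
def Spec_check_any_2seq (password : String) (out : Bool) : Prop := out = check_any_2seq_alt password
instance (password : String) (out : Bool) : Decidable (Spec_check_any_2seq password out) := by unfold Spec_check_any_2seq; infer_instance

-- ===== CLAIM (what is proved, stated in full; the proofs are below) =====
def Claim_equal_check_any_2seq : Prop := ∀ (password : String), Dom_check_any_2seq password → Spec_check_any_2seq password (check_any_2seq password)

-- ===== LEMMAS AND PROOFS =====

-- the list of maximal runs of consecutive equal characters (proof-side view of A)
def pvRuns : List Char → List (List Char)
  | [] => []
  | c :: rest => (c :: rest.takeWhile (· == c)) :: pvRuns (rest.dropWhile (· == c))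
termination_by l => l.length
decreasing_by
  exact Nat.lt_succ_of_le (List.length_dropWhile_le _ _)

-- A's inner while counts exactly the leading run and leaves its complement.
theorem pvInner_eq (curr : Char) (l : List Char) (cnt : Int) :
    pvInner curr l cnt = (cnt + (l.takeWhile (· == curr)).length, l.dropWhile (· == curr)) := by
  induction l generalizing cnt with
  | nil => simp [pvInner]
  | cons c rest ih =>
    simp only [pvInner, List.takeWhile, List.dropWhile]
    by_cases h : c == curr
    · simp only [h, if_true, ih, List.length_cons]
      congr 1
      push_cast
      ring
    · simp [h]

theorem pvOuter_eq_runs (l : List Char) :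
    pvOuter l = (pvRuns l).any (fun g => g.length == 2) := by
  induction l using pvRuns.induct with
  | case1 => simp [pvOuter, pvRuns]
  | case2 c rest ih =>
    rw [pvOuter, pvRuns]
    simp only [pvInner_eq, List.any_cons]
    by_cases h : (1 + ((rest.takeWhile (· == c)).length : Int)) = 2
    · have h2 : (c :: rest.takeWhile (· == c)).length = 2 := by
        simp only [List.length_cons]; omega
      simp [h, h2]
    · have hb : ((1 + ((rest.takeWhile (· == c)).length : Int)) == 2) = false := by
        simpa using h
      have h2 : ((c :: rest.takeWhile (· == c)).length == 2) = false := by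
        simp only [List.length_cons, beq_eq_false_iff_ne, ne_eq]
        omega
      rw [hb, h2]
      simpa using ih

-- prev-aware window predicate: like pvWin but, at i = 0, the "previous character"
-- is the explicit prev instead of being absent
def pvWinP (prev : Option Char) (l : List Char) (i : Nat) : Bool :=
  (l.getD i ' ' == l.getD (i + 1) ' ') &&
  (if i = 0 then decide (prev ≠ some (l.getD 0 ' '))
   else l.getD (i - 1) ' ' != l.getD i ' ') &&
  (i + 2 == l.length || l.getD (i + 2) ' ' != l.getD i ' ')

def pvG (prev : Option Char) (l : List Char) : Bool :=
  (List.range (l.length - 1)).any (pvWinP prev l)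

-- shifting one char: position i+1 in c::rest is position i in rest with prev = c
theorem pvWinP_shift (prev : Option Char) (c : Char) (rest : List Char) (i : Nat) :
    pvWinP prev (c :: rest) (i + 1) = pvWinP (some c) rest i := by
  unfold pvWinP
  cases i with
  | zero => simp only [List.getD, List.length_cons]
            cases rest with
            | nil => simp
            | cons d t =>
              by_cases hcd : c = d
              · simp [hcd]
              · have hb : (c == d) = false := by simpa using hcd
                simp [bne, hb, hcd]
  | succ j => simp [List.getD, List.length_cons]

theorem pvWinP_single (prev : Option Char) (c : Char) :
    pvWinP prev [c] 0 = false := by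
  unfold pvWinP
  by_cases h : c = ' ' <;> simp [List.getD, h]

-- recurrence of pvG on one peeled character
theorem pvG_cons (prev : Option Char) (c : Char) (rest : List Char) :
    pvG prev (c :: rest) = (pvWinP prev (c :: rest) 0 || pvG (some c) rest) := by
  cases rest with
  | nil => simp [pvG, pvWinP_single]
  | cons d t =>
    unfold pvG
    have hlen : (c :: d :: t).length - 1 = ((d :: t).length - 1) + 1 := by
      simp [List.length_cons]
    rw [hlen, List.range_succ_eq_map, List.any_cons, List.any_map]
    congr 1
    exact List.any_congr rfl (fun i => pvWinP_shift prev c (d :: t) i)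

-- while prev equals the head, position 0 never fires: pvG skips the rest of the run
theorem pvG_skip (c : Char) (l : List Char) :
    pvG (some c) l = pvG (some c) (l.dropWhile (· == c)) := by
  induction l with
  | nil => simp
  | cons d t ih =>
    by_cases h : d = c
    · subst h
      have h0 : pvWinP (some d) (d :: t) 0 = false := by
        unfold pvWinP
        simp [List.getD]
      rw [List.dropWhile_cons_of_pos (by simp), ← ih, pvG_cons, h0, Bool.false_or]
    · rw [List.dropWhile_cons_of_neg (by simp [h])]

-- the main invariant: with prev different from the head, pvG sees exactly the
-- runs of length 2
theorem pvG_eq_runs (l : List Char) (prev : Option Char)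
    (hp : ∀ c, l.head? = some c → prev ≠ some c) :
    pvG prev l = (pvRuns l).any (fun g => g.length == 2) := by
  induction l using pvRuns.induct generalizing prev with
  | case1 => simp [pvG, pvRuns]
  | case2 c rest ih =>
    have hpc : prev ≠ some c := hp c rfl
    have hdrop : ∀ d, (rest.dropWhile (· == c)).head? = some d → (some c : Option Char) ≠ some d := by
      intro d hd hcd
      have := List.head?_dropWhile_not (p := (· == c)) (l := rest)
      rw [hd] at this
      simp at this
      exact this (by injection hcd with h; exact h.symm)
    rw [pvRuns, List.any_cons, pvG_cons, pvG_skip, ih _ hdrop]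
    congr 1
    -- position-0 window fires iff the leading run has length exactly 2
    unfold pvWinP
    have hprev : decide (prev ≠ some ((c :: rest).getD 0 ' ')) = true := by
      simp [List.getD, hpc]
    cases rest with
    | nil =>
      by_cases h : c = ' ' <;> simp [List.getD, h, hpc]
    | cons d t =>
      by_cases hdc : d = c
      · subst hdc
        cases t with
        | nil => simp [List.getD, List.length_cons, hpc]
        | cons e t2 =>
          by_cases hec : e = d
          · subst hec
            simp [List.getD, List.length_cons, hpc]
          · simp [List.getD, List.length_cons, hpc, hec]
      · have hb : (c == d) = false := by simpa using Ne.symm hdc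
        simp [List.getD, List.length_cons, hpc, hdc, hb]

-- the port's prev-free predicate agrees with pvWinP none everywhere
theorem pvWin_eq_winP (l : List Char) (i : Nat) :
    pvWin l l.length i = pvWinP none l i := by
  unfold pvWin pvWinP
  cases i <;> simp

-- ===== VERDICT (by name: the statement is the Claim_ definition above) =====
theorem check_any_2seq_spec : Claim_equal_check_any_2seq := by
  intro password _
  unfold Spec_check_any_2seq check_any_2seq check_any_2seq_alt
  rw [pvOuter_eq_runs]
  rw [show (List.range (password.toList.length - 1)).any
        (pvWin password.toList password.toList.length)
      = pvG none password.toList from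
    List.any_congr rfl (fun i => pvWin_eq_winP password.toList i)]
  rw [pvG_eq_runs]
  intro c _
  simp
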